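-- pv_equiv track=rewrite | github.com/eirikhoe/advent-of-code | 2016/07/sol.py | has_ssl_support
-- ===== SOURCE A (Python) =====
-- def has_ssl_support(ip):
--     hypernet = 0
--     abas = set()
--     babs = set()
--     for i in range(len(ip)-2):
--         if ip[i] == '[':
--             hypernet += 1
--         elif ip[i] == ']':
--             hypernet -= 1
--         else:
--             crit = (ip[i]==ip[i+2]) and (ip[i]!=ip[i+1])
--             if crit and hypernet:
--                 babs.add(ip[i+1]+ip[i])
--             elif crit:
--                 abas.add(ip[i]+ip[i+1])
--     return not abas.isdisjoint(babs)
-- ===== SOURCE B (Python) =====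
-- def _pairs(seg):
--     # (outer, middle) for every length-3 window a b a with a != b
--     return {(a, b) for a, b, c in zip(seg, seg[1:], seg[2:]) if a == c != b}
--
--
-- def has_ssl_support(ip):
--     # Split ip into maximal bracket-free runs, each tagged with the bracket
--     # depth it sits at; a run is hypernet when that depth is nonzero.
--     segs, depth, cur = [], 0, []
--     for ch in ip:
--         if ch in '[]':
--             if cur:
--                 segs.append((depth, ''.join(cur)))
--                 cur = []
--             depth += 1 if ch == '[' else -1
--         else:
--             cur.append(ch)
--     if cur:
--         segs.append((depth, ''.join(cur)))
--     abas, babs = set(), set()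
--     for d, seg in segs:
--         pats = _pairs(seg)
--         if d:
--             babs |= {(b, a) for a, b in pats}
--         else:
--             abas |= pats
--     return bool(abas & babs)
-- ===== Notes on version B (the rewrite author's own statement) =====
-- stated objective: idiomatic
-- what changed: B first splits the IP into depth-tagged bracket-free segments, collects normalized ABA/BAB pairs per segment with a window comprehension, and intersects the two sets, instead of A's single index loop over the whole string that mixes bracket-depth bookkeeping with window tests and stores bracket-spanning junk patterns.
import Mathlib
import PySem

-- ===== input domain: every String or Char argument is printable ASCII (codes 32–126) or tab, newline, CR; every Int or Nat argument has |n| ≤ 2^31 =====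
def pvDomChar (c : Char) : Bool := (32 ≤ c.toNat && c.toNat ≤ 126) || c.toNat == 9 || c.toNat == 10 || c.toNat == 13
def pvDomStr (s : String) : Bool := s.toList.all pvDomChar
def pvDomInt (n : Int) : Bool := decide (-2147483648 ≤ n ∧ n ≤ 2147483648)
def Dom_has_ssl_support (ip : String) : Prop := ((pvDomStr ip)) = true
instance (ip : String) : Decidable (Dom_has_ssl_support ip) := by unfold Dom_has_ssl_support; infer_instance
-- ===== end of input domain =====

-- B splits the IP into depth-tagged bracket-free segments and intersects per-segment
-- pattern sets instead of A's single index loop; objective: more idiomatic decomposition.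

-- ===== PORT A =====
-- one loop step of A: bracket bookkeeping, else the window test at index i
def pvStepA (l : List Char) (st : Int × PySem.Set String × PySem.Set String)
    (i : Int) : Int × PySem.Set String × PySem.Set String :=
  let c0 := PySem.List.pyGetD l i ' '
  let c1 := PySem.List.pyGetD l (i + 1) ' '
  let c2 := PySem.List.pyGetD l (i + 2) ' '
  if c0 = '[' then (st.1 + 1, st.2.1, st.2.2)
  else if c0 = ']' then (st.1 - 1, st.2.1, st.2.2)
  else if (c0 = c2 ∧ c0 ≠ c1) ∧ st.1 ≠ 0 then
    (st.1, st.2.1, PySem.Set.add st.2.2 (String.ofList [c1, c0]))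
  else if c0 = c2 ∧ c0 ≠ c1 then
    (st.1, PySem.Set.add st.2.1 (String.ofList [c0, c1]), st.2.2)
  else st

def has_ssl_support (ip : String) : Bool :=
  let l := ip.toList
  let st := (PySem.List.pyRange 0 ((l.length : Int) - 2)).foldl (pvStepA l)
    (0, PySem.Set.empty, PySem.Set.empty)
  !(PySem.Set.isdisjoint st.2.1 st.2.2)

-- ===== PORT B =====
def pvIsBracket (c : Char) : Bool := c = '[' || c = ']'

-- _pairs: (outer, middle) of every window a b a with a ≠ b (zip of the three shifts)
def pvPairs : List Char → List (Char × Char)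
  | a :: b :: c :: rest => (if a = c ∧ a ≠ b then [(a, b)] else []) ++ pvPairs (b :: c :: rest)
  | _ => []

-- one step of the splitting loop; state = (segs, depth, cur)
def pvStepSplit (st : List (Int × List Char) × Int × List Char) (ch : Char) :
    List (Int × List Char) × Int × List Char :=
  if pvIsBracket ch then
    ((if st.2.2 ≠ [] then st.1 ++ [(st.2.1, st.2.2)] else st.1),
     st.2.1 + (if ch = '[' then 1 else -1), [])
  else (st.1, st.2.1, st.2.2 ++ [ch])

-- the trailing 'if cur: segs.append((depth, cur))'
def pvFlush (st : List (Int × List Char) × Int × List Char) : List (Int × List Char) :=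
  st.1 ++ (if st.2.2 ≠ [] then [(st.2.1, st.2.2)] else [])

-- one step of the collecting loop over (depth, seg)
def pvStepCollect (ab : PySem.Set (Char × Char) × PySem.Set (Char × Char))
    (ds : Int × List Char) : PySem.Set (Char × Char) × PySem.Set (Char × Char) :=
  let pats := PySem.Set.ofList (pvPairs ds.2)
  if ds.1 ≠ 0 then (ab.1, PySem.Set.union ab.2 (pats.map (fun p => (p.2, p.1))))
  else (PySem.Set.union ab.1 pats, ab.2)

def has_ssl_support_alt (ip : String) : Bool :=
  let segs := pvFlush (ip.toList.foldl pvStepSplit ([], 0, []))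
  let ab := segs.foldl pvStepCollect (PySem.Set.empty, PySem.Set.empty)
  !(PySem.Set.inter ab.1 ab.2).isEmpty

-- ===== PRECONDITION & SPEC =====
def Spec_has_ssl_support (ip : String) (out : Bool) : Prop := out = has_ssl_support_alt ip
instance (ip : String) (out : Bool) : Decidable (Spec_has_ssl_support ip out) := by unfold Spec_has_ssl_support; infer_instance

-- ===== CLAIM (what is proved, stated in full; the proofs are below) =====
def Claim_equal_has_ssl_support : Prop := ∀ (ip : String), Dom_has_ssl_support ip → Spec_has_ssl_support ip (has_ssl_support ip)

-- ===== LEMMAS AND PROOFS =====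

-- bracket depth of a prefix
def pvDep (l : List Char) : Int := (l.count '[' : Int) - (l.count ']' : Int)

def pvC (l : List Char) (i : Nat) : Char := l.getD i ' '

-- an occurrence of the window c m c whose prefix depth satisfies P
def pvOcc (l : List Char) (c m : Char) (P : Int → Prop) : Prop :=
  ∃ pre suf, l = pre ++ [c, m, c] ++ suf ∧ P (pvDep pre)

-- the common characterization both programs are reduced to
def pvMatch (l : List Char) : Prop :=
  ∃ c m, pvIsBracket c = false ∧ pvIsBracket m = false ∧ c ≠ m ∧
    pvOcc l c m (· = 0) ∧ pvOcc l m c (· ≠ 0)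

def pvAbaAt (l : List Char) (i : Nat) (s : String) : Prop :=
  pvC l i ≠ '[' ∧ pvC l i ≠ ']' ∧ pvC l i = pvC l (i + 2) ∧ pvC l i ≠ pvC l (i + 1) ∧
    pvDep (l.take i) = 0 ∧ s = String.ofList [pvC l i, pvC l (i + 1)]

def pvBabAt (l : List Char) (i : Nat) (s : String) : Prop :=
  pvC l i ≠ '[' ∧ pvC l i ≠ ']' ∧ pvC l i = pvC l (i + 2) ∧ pvC l i ≠ pvC l (i + 1) ∧
    pvDep (l.take i) ≠ 0 ∧ s = String.ofList [pvC l (i + 1), pvC l i]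

lemma pvDep_take_succ (l : List Char) (k : Nat) (h : k < l.length) :
    pvDep (l.take (k + 1)) = pvDep (l.take k) +
      (if pvC l k = '[' then 1 else if pvC l k = ']' then -1 else 0) := by
  have ht : l.take (k+1) = l.take k ++ [l[k]] := by
    rw [List.take_succ]; simp [List.getElem?_eq_getElem h]
  have hc : pvC l k = l[k] := by simp [pvC, List.getD_eq_getElem?_getD, List.getElem?_eq_getElem h]
  rw [ht]
  simp only [pvDep, List.count_append, hc]
  by_cases h1 : l[k] = '[' <;> by_cases h2 : l[k] = ']' <;> simp [h1, h2] <;> omega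

lemma pvDep_brfree (l : List Char) (h : ∀ ch ∈ l, pvIsBracket ch = false) : pvDep l = 0 := by
  have h1 : l.count '[' = 0 := List.count_eq_zero.mpr (fun hm => by
    have := h _ hm; simp [pvIsBracket] at this)
  have h2 : l.count ']' = 0 := List.count_eq_zero.mpr (fun hm => by
    have := h _ hm; simp [pvIsBracket] at this)
  simp [pvDep, h1, h2]

lemma pvPairs_mem (s : List Char) (c m : Char) :
    (c, m) ∈ pvPairs s ↔ ([c, m, c] <:+: s ∧ c ≠ m) := by
  induction s using pvPairs.induct with
  | case1 a b cc rest ih =>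
    rw [pvPairs, List.infix_cons_iff]
    simp only [List.mem_append, ih]
    constructor
    · rintro (h | ⟨h1, h2⟩)
      · by_cases hif : a = cc ∧ a ≠ b
        · rw [if_pos hif] at h
          simp only [List.mem_singleton, Prod.mk.injEq] at h
          obtain ⟨rfl, rfl⟩ := h
          refine ⟨Or.inl ⟨rest, ?_⟩, hif.2⟩
          simp [hif.1.symm]
        · rw [if_neg hif] at h; simp at h
      · exact ⟨Or.inr h1, h2⟩
    · rintro ⟨h | h, hne⟩
      · left
        rcases h with ⟨t, ht⟩
        simp only [List.cons_append, List.nil_append, List.cons.injEq] at ht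
        obtain ⟨rfl, rfl, rfl, _⟩ := ht
        simp [hne]
      · exact Or.inr ⟨h, hne⟩
  | case2 s h =>
    have hlt : s.length < 3 := by
      rcases s with _ | ⟨a, _ | ⟨b, _ | ⟨d, r⟩⟩⟩
      · simp
      · simp
      · simp
      · exact (h a b d r rfl).elim
    constructor
    · intro hin
      exfalso
      rcases s with _ | ⟨a, _ | ⟨b, _ | ⟨d, r⟩⟩⟩
      · simp [pvPairs] at hin
      · simp [pvPairs] at hin
      · simp [pvPairs] at hin
      · exact (h a b d r rfl).elim
    · rintro ⟨hin, -⟩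
      have := hin.length_le
      simp at this
      omega

lemma pvPrefix_of_append (ch : Char) :
    ∀ (w x t s' : List Char), ch ∉ w → w ++ s' = x ++ ch :: t → w <+: x := by
  intro w
  induction w with
  | nil => intro x t s' _ _; exact List.nil_prefix
  | cons b w' ih =>
    intro x t s' hch h
    cases x with
    | nil =>
      simp at h
      exact absurd (h.1 ▸ List.mem_cons_self) hch
    | cons a x' =>
      simp only [List.cons_append, List.cons.injEq] at h
      obtain ⟨rfl, h2⟩ := h
      exact List.cons_prefix_cons.mpr
        ⟨rfl, ih x' t s' (fun hm => hch (List.mem_cons_of_mem _ hm)) h2⟩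

lemma pvSplit_occ (w : List Char) (ch : Char) (hch : ch ∉ w) :
    ∀ (x pre t suf : List Char), x ++ ch :: t = pre ++ w ++ suf →
      (∃ suf', x = pre ++ w ++ suf') ∨ (∃ pre', pre = x ++ ch :: pre' ∧ t = pre' ++ w ++ suf) := by
  intro x
  induction x with
  | nil =>
    intro pre t suf h
    cases pre with
    | nil =>
      cases w with
      | nil => exact Or.inl ⟨[], by simp⟩
      | cons b w' =>
        simp only [List.nil_append, List.cons_append, List.cons.injEq] at h
        exact absurd (h.1 ▸ List.mem_cons_self) hch
    | cons p pre'' =>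
      simp only [List.nil_append, List.cons_append, List.cons.injEq] at h
      obtain ⟨rfl, h2⟩ := h
      exact Or.inr ⟨pre'', rfl, h2⟩
  | cons a x' ih =>
    intro pre t suf h
    cases pre with
    | nil =>
      -- a :: x' ++ ch :: t = w ++ suf
      have hp : w <+: (a :: x') := pvPrefix_of_append ch w (a :: x') t suf hch (by simpa using h.symm)
      rcases hp with ⟨rest, hrest⟩
      exact Or.inl ⟨rest, by simp [hrest.symm]⟩
    | cons p pre'' =>
      simp only [List.cons_append, List.cons.injEq] at h
      obtain ⟨rfl, h2⟩ := h
      rcases ih pre'' t suf h2 with ⟨suf', h3⟩ | ⟨pre', h3, h4⟩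
      · exact Or.inl ⟨suf', by simp [h3]⟩
      · exact Or.inr ⟨pre', by simp [h3], h4⟩

lemma pvOcc_iff (l : List Char) (c m : Char) (P : Int → Prop) :
    pvOcc l c m P ↔ ∃ i, i + 2 < l.length ∧ pvC l i = c ∧ pvC l (i + 1) = m ∧
      pvC l (i + 2) = c ∧ P (pvDep (l.take i)) := by
  constructor
  · rintro ⟨pre, suf, rfl, hP⟩
    refine ⟨pre.length, by simp, ?_, ?_, ?_, ?_⟩
    · simp [pvC, List.getD_eq_getElem?_getD]
    · simp [pvC, List.getD_eq_getElem?_getD]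
    · simp [pvC, List.getD_eq_getElem?_getD]
    · simpa [List.take_left] using hP
  · rintro ⟨i, hlen, hc0, hc1, hc2, hP⟩
    refine ⟨l.take i, l.drop (i + 3), ?_, ?_⟩
    · have h0 : i < l.length := by omega
      have h1 : i + 1 < l.length := by omega
      have h2 : i + 2 < l.length := by omega
      have e0 : l.drop i = l[i] :: l.drop (i + 1) := List.drop_eq_getElem_cons h0
      have e1 : l.drop (i+1) = l[i+1] :: l.drop (i + 2) := List.drop_eq_getElem_cons h1
      have e2 : l.drop (i+2) = l[i+2] :: l.drop (i + 3) := List.drop_eq_getElem_cons h2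
      have hc0' : l[i] = c := by simpa [pvC, List.getD_eq_getElem?_getD, List.getElem?_eq_getElem h0] using hc0
      have hc1' : l[i+1] = m := by simpa [pvC, List.getD_eq_getElem?_getD, List.getElem?_eq_getElem h1] using hc1
      have hc2' : l[i+2] = c := by simpa [pvC, List.getD_eq_getElem?_getD, List.getElem?_eq_getElem h2] using hc2
      conv_lhs => rw [← List.take_append_drop i l, e0, e1, e2, hc0', hc1', hc2']
      simp
    · exact hP

lemma pvA_inv (l : List Char) (k : Nat) (hk : k ≤ l.length - 2) :
    let st := (List.range k).foldl (fun st (i : Nat) => pvStepA l st (i : Int))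
      (0, PySem.Set.empty, PySem.Set.empty)
    st.1 = pvDep (l.take k) ∧
      (∀ s, s ∈ st.2.1 ↔ ∃ i, i < k ∧ pvAbaAt l i s) ∧
      (∀ s, s ∈ st.2.2 ↔ ∃ i, i < k ∧ pvBabAt l i s) := by
  induction k with
  | zero =>
    simp [pvDep, PySem.Set.empty]
  | succ k ih =>
    have hk' : k ≤ l.length - 2 := by omega
    have hkl : k < l.length := by omega
    obtain ⟨ih1, ih2, ih3⟩ := ih hk'
    rw [List.range_succ, List.foldl_append, List.foldl_cons, List.foldl_nil]
    set st := (List.range k).foldl (fun st (i : Nat) => pvStepA l st (i : Int))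
      (0, PySem.Set.empty, PySem.Set.empty) with hst
    -- evaluate the chars
    have g0 : PySem.List.pyGetD l (k : Int) ' ' = pvC l k := by
      rw [PySem.List.pyGetD_natCast]; rfl
    have g1 : PySem.List.pyGetD l ((k : Int) + 1) ' ' = pvC l (k + 1) := by
      rw [show ((k : Int) + 1) = ((k + 1 : Nat) : Int) by push_cast; ring,
        PySem.List.pyGetD_natCast]; rfl
    have g2 : PySem.List.pyGetD l ((k : Int) + 2) ' ' = pvC l (k + 2) := by
      rw [show ((k : Int) + 2) = ((k + 2 : Nat) : Int) by push_cast; ring,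
        PySem.List.pyGetD_natCast]; rfl
    have hdep := pvDep_take_succ l k hkl
    unfold pvStepA
    simp only [g0, g1, g2]
    by_cases hb0 : pvC l k = '['
    · rw [if_pos hb0]
      refine ⟨by rw [hdep, ih1]; simp [hb0], ?_, ?_⟩
      · intro s; rw [ih2]
        constructor
        · rintro ⟨i, hi, h⟩; exact ⟨i, by omega, h⟩
        · rintro ⟨i, hi, h⟩
          rcases Nat.lt_succ_iff_lt_or_eq.mp hi with hi' | rfl
          · exact ⟨i, hi', h⟩
          · exact absurd hb0 h.1
      · intro s; rw [ih3]
        constructor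
        · rintro ⟨i, hi, h⟩; exact ⟨i, by omega, h⟩
        · rintro ⟨i, hi, h⟩
          rcases Nat.lt_succ_iff_lt_or_eq.mp hi with hi' | rfl
          · exact ⟨i, hi', h⟩
          · exact absurd hb0 h.1
    · rw [if_neg hb0]
      by_cases hb1 : pvC l k = ']'
      · rw [if_pos hb1]
        refine ⟨by rw [hdep, ih1]; simp [hb1]; ring, ?_, ?_⟩
        · intro s; rw [ih2]
          constructor
          · rintro ⟨i, hi, h⟩; exact ⟨i, by omega, h⟩
          · rintro ⟨i, hi, h⟩
            rcases Nat.lt_succ_iff_lt_or_eq.mp hi with hi' | rfl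
            · exact ⟨i, hi', h⟩
            · exact absurd hb1 h.2.1
        · intro s; rw [ih3]
          constructor
          · rintro ⟨i, hi, h⟩; exact ⟨i, by omega, h⟩
          · rintro ⟨i, hi, h⟩
            rcases Nat.lt_succ_iff_lt_or_eq.mp hi with hi' | rfl
            · exact ⟨i, hi', h⟩
            · exact absurd hb1 h.2.1
      · rw [if_neg hb1]
        have hdep' : pvDep (l.take (k+1)) = pvDep (l.take k) := by
          rw [hdep]; simp [hb0, hb1]
        by_cases hcrit : pvC l k = pvC l (k + 2) ∧ pvC l k ≠ pvC l (k + 1)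
        · by_cases hhyp : st.1 ≠ 0
          · rw [if_pos ⟨hcrit, hhyp⟩]
            refine ⟨by rw [hdep', ih1], ?_, ?_⟩
            · intro s; rw [ih2]
              constructor
              · rintro ⟨i, hi, h⟩; exact ⟨i, by omega, h⟩
              · rintro ⟨i, hi, h⟩
                rcases Nat.lt_succ_iff_lt_or_eq.mp hi with hi' | rfl
                · exact ⟨i, hi', h⟩
                · exact absurd h.2.2.2.2.1 (ih1 ▸ hhyp)
            · intro s
              rw [PySem.Set.mem_add, ih3]
              constructor
              · rintro (⟨i, hi, h⟩ | rfl)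
                · exact ⟨i, by omega, h⟩
                · exact ⟨k, by omega, hb0, hb1, hcrit.1, hcrit.2, by rw [← ih1]; exact hhyp, rfl⟩
              · rintro ⟨i, hi, h⟩
                rcases Nat.lt_succ_iff_lt_or_eq.mp hi with hi' | rfl
                · exact Or.inl ⟨i, hi', h⟩
                · exact Or.inr h.2.2.2.2.2
          · rw [if_neg (by tauto), if_pos hcrit]
            push_neg at hhyp
            refine ⟨by rw [hdep', ih1], ?_, ?_⟩
            · intro s
              rw [PySem.Set.mem_add, ih2]
              constructor
              · rintro (⟨i, hi, h⟩ | rfl)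
                · exact ⟨i, by omega, h⟩
                · exact ⟨k, by omega, hb0, hb1, hcrit.1, hcrit.2, by rw [← ih1]; exact hhyp, rfl⟩
              · rintro ⟨i, hi, h⟩
                rcases Nat.lt_succ_iff_lt_or_eq.mp hi with hi' | rfl
                · exact Or.inl ⟨i, hi', h⟩
                · exact Or.inr h.2.2.2.2.2
            · intro s; rw [ih3]
              constructor
              · rintro ⟨i, hi, h⟩; exact ⟨i, by omega, h⟩
              · rintro ⟨i, hi, h⟩
                rcases Nat.lt_succ_iff_lt_or_eq.mp hi with hi' | rfl
                · exact ⟨i, hi', h⟩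
                · exact absurd (ih1 ▸ hhyp) h.2.2.2.2.1
        · rw [if_neg (by tauto), if_neg hcrit]
          refine ⟨by rw [hdep', ih1], ?_, ?_⟩
          · intro s; rw [ih2]
            constructor
            · rintro ⟨i, hi, h⟩; exact ⟨i, by omega, h⟩
            · rintro ⟨i, hi, h⟩
              rcases Nat.lt_succ_iff_lt_or_eq.mp hi with hi' | rfl
              · exact ⟨i, hi', h⟩
              · exact absurd ⟨h.2.2.1, h.2.2.2.1⟩ hcrit
          · intro s; rw [ih3]
            constructor
            · rintro ⟨i, hi, h⟩; exact ⟨i, by omega, h⟩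
            · rintro ⟨i, hi, h⟩
              rcases Nat.lt_succ_iff_lt_or_eq.mp hi with hi' | rfl
              · exact ⟨i, hi', h⟩
              · exact absurd ⟨h.2.2.1, h.2.2.2.1⟩ hcrit

lemma pvA_iff (ip : String) : has_ssl_support ip = true ↔ pvMatch ip.toList := by
  unfold has_ssl_support
  set l := ip.toList with hl
  have hfold : (PySem.List.pyRange 0 ((l.length : Int) - 2)).foldl (pvStepA l)
        (0, PySem.Set.empty, PySem.Set.empty)
      = (List.range (l.length - 2)).foldl (fun st (i : Nat) => pvStepA l st (i : Int))
        (0, PySem.Set.empty, PySem.Set.empty) := by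
    rcases Nat.lt_or_ge l.length 2 with h2 | h2
    · rw [show PySem.List.pyRange 0 ((l.length : Int) - 2) = [] from by
        simp [PySem.List.pyRange]; omega,
        show l.length - 2 = 0 from by omega]
      simp
    · rw [show ((l.length : Int) - 2) = ((l.length - 2 : Nat) : Int) from by omega,
        PySem.List.pyRange_zero_natCast, List.foldl_map]
  simp only [hfold]
  obtain ⟨h1, h2s, h3s⟩ := pvA_inv l (l.length - 2) (le_refl _)
  set st := (List.range (l.length - 2)).foldl (fun st (i : Nat) => pvStepA l st (i : Int))
    (0, PySem.Set.empty, PySem.Set.empty) with hst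
  have hbool : (!(PySem.Set.isdisjoint st.2.1 st.2.2)) = true ↔ ∃ s, s ∈ st.2.1 ∧ s ∈ st.2.2 := by
    rw [Bool.not_eq_true']
    constructor
    · intro h
      by_contra hn
      push_neg at hn
      rw [(PySem.Set.isdisjoint_iff st.2.1 st.2.2).mpr (fun x hx => hn x hx)] at h
      simp at h
    · rintro ⟨s, hs1, hs2⟩
      cases hd : PySem.Set.isdisjoint st.2.1 st.2.2
      · rfl
      · exact absurd hs2 ((PySem.Set.isdisjoint_iff st.2.1 st.2.2).mp hd s hs1)
  rw [hbool]
  constructor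
  · rintro ⟨s, hs1, hs2⟩
    obtain ⟨i, hi, hA⟩ := (h2s s).mp hs1
    obtain ⟨j, hj, hB⟩ := (h3s s).mp hs2
    obtain ⟨hA1, hA2, hA3, hA4, hA5, hA6⟩ := hA
    obtain ⟨hB1, hB2, hB3, hB4, hB5, hB6⟩ := hB
    have hse : ([pvC l i, pvC l (i+1)] : List Char) = [pvC l (j+1), pvC l j] := by
      have := hA6 ▸ hB6
      simpa using congrArg String.toList this
    simp only [List.cons.injEq, and_true] at hse
    obtain ⟨he1, he2⟩ := hse
    refine ⟨pvC l i, pvC l (i+1), by simp [pvIsBracket, hA1, hA2],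
      by rw [he2]; simp [pvIsBracket, hB1, hB2], hA4, ?_, ?_⟩
    · exact (pvOcc_iff l _ _ _).mpr ⟨i, by omega, rfl, rfl, hA3.symm, hA5⟩
    · exact (pvOcc_iff l _ _ _).mpr ⟨j, by omega, he2.symm, he1.symm, by rw [← hB3, he2], hB5⟩
  · rintro ⟨c, m, hc, hm, hcm, ho1, ho2⟩
    obtain ⟨i, hi, hi0, hi1, hi2, hiP⟩ := (pvOcc_iff l _ _ _).mp ho1
    obtain ⟨j, hj, hj0, hj1, hj2, hjP⟩ := (pvOcc_iff l _ _ _).mp ho2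
    refine ⟨String.ofList [c, m], ?_, ?_⟩
    · refine (h2s _).mpr ⟨i, by omega, ?_⟩
      simp only [pvIsBracket, Bool.or_eq_false_iff, decide_eq_false_iff_not] at hc
      exact ⟨hi0 ▸ hc.1, hi0 ▸ hc.2, by rw [hi0, hi2], by rw [hi0, hi1]; exact hcm, hiP,
        by rw [hi0, hi1]⟩
    · refine (h3s _).mpr ⟨j, by omega, ?_⟩
      simp only [pvIsBracket, Bool.or_eq_false_iff, decide_eq_false_iff_not] at hm
      exact ⟨hj0 ▸ hm.1, hj0 ▸ hm.2, by rw [hj0, hj2], by rw [hj0, hj1]; exact fun h => hcm h.symm, hjP,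
        by rw [hj0, hj1]⟩

lemma pvDep_append (a b : List Char) : pvDep (a ++ b) = pvDep a + pvDep b := by
  simp [pvDep, List.count_append]; ring

lemma pvDep_cons_bracket (ch : Char) (pre' : List Char) (hch : pvIsBracket ch = true) :
    pvDep (ch :: pre') = (if ch = '[' then 1 else -1) + pvDep pre' := by
  simp only [pvIsBracket, Bool.or_eq_true, decide_eq_true_eq] at hch
  rcases hch with rfl | rfl <;> simp [pvDep, List.count_cons] <;> ring

lemma pvOcc_mid (w : List Char) (hw : w ≠ []) (hwb : ∀ ch ∈ w, pvIsBracket ch = false)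
    (P : Int → Prop) (d0 : Int) (ch : Char) (hch : pvIsBracket ch = true)
    (x t : List Char) (hx : ∀ c ∈ x, pvIsBracket c = false) :
    (∃ pre suf, x ++ ch :: t = pre ++ w ++ suf ∧ P (d0 + pvDep pre)) ↔
      ((w <:+: x ∧ P d0) ∨
       ∃ pre suf, t = pre ++ w ++ suf ∧ P (d0 + (if ch = '[' then 1 else -1) + pvDep pre)) := by
  have hchw : ch ∉ w := fun hm => by rw [hwb ch hm] at hch; exact Bool.false_ne_true hch
  constructor
  · rintro ⟨pre, suf, heq, hP⟩
    rcases pvSplit_occ w ch hchw x pre t suf heq with ⟨suf', hx'⟩ | ⟨pre', rfl, ht⟩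
    · left
      have hpre0 : pvDep pre = 0 := pvDep_brfree pre (fun c hc =>
        hx c (by rw [hx']; exact List.mem_append_left _ (List.mem_append_left _ hc)))
      exact ⟨⟨pre, suf', hx'.symm⟩, by rwa [hpre0, add_zero] at hP⟩
    · right
      refine ⟨pre', suf, ht, ?_⟩
      have : d0 + pvDep (x ++ ch :: pre') = d0 + (if ch = '[' then 1 else -1) + pvDep pre' := by
        rw [pvDep_append, pvDep_brfree x hx, pvDep_cons_bracket ch pre' hch]; ring
      rwa [this] at hP
  · rintro (⟨⟨pre, suf', hinf⟩, hP⟩ | ⟨pre, suf, rfl, hP⟩)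
    · have hpre0 : pvDep pre = 0 := pvDep_brfree pre (fun c hc =>
        hx c (by rw [← hinf]; exact List.mem_append_left _ (List.mem_append_left _ hc)))
      refine ⟨pre, suf' ++ ch :: t, by rw [← hinf]; simp, by rwa [hpre0, add_zero]⟩
    · refine ⟨x ++ ch :: pre, suf, by simp, ?_⟩
      have : d0 + (if ch = '[' then 1 else -1) + pvDep pre = d0 + pvDep (x ++ ch :: pre) := by
        rw [pvDep_append, pvDep_brfree x hx, pvDep_cons_bracket ch pre hch]; ring
      rwa [this] at hP

lemma pvM (w : List Char) (hw : w ≠ []) (hwb : ∀ ch ∈ w, pvIsBracket ch = false)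
    (P : Int → Prop) :
    ∀ (l : List Char) (segs0 : List (Int × List Char)) (d0 : Int) (cur0 : List Char),
      (∀ ch ∈ cur0, pvIsBracket ch = false) →
      ((∃ ds, ds ∈ pvFlush (l.foldl pvStepSplit (segs0, d0, cur0)) ∧ P ds.1 ∧ w <:+: ds.2) ↔
       ((∃ ds, ds ∈ segs0 ∧ P ds.1 ∧ w <:+: ds.2) ∨
        (∃ pre suf, cur0 ++ l = pre ++ w ++ suf ∧ P (d0 + pvDep pre)))) := by
  intro l
  induction l with
  | nil =>
    intro segs0 d0 cur0 hcur
    simp only [List.foldl_nil, pvFlush, List.mem_append]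
    constructor
    · rintro ⟨ds, hds | hds, hP, hinf⟩
      · exact Or.inl ⟨ds, hds, hP, hinf⟩
      · right
        by_cases hc : cur0 ≠ []
        · rw [if_pos hc] at hds
          simp only [List.mem_singleton] at hds
          subst hds
          rcases hinf with ⟨pre, suf, hinf⟩
          have heq : cur0 = pre ++ w ++ suf := hinf.symm
          have hpre0 : pvDep pre = 0 := pvDep_brfree pre (fun c hc' =>
            hcur c (by rw [heq]; exact List.mem_append_left _ (List.mem_append_left _ hc')))
          exact ⟨pre, suf, by rw [List.append_nil, heq], by rwa [hpre0, add_zero]⟩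
        · rw [if_neg hc] at hds; simp at hds
    · rintro (⟨ds, hds, hP, hinf⟩ | ⟨pre, suf, heq, hP⟩)
      · exact ⟨ds, Or.inl hds, hP, hinf⟩
      · rw [List.append_nil] at heq
        have hc : cur0 ≠ [] := by
          rw [heq]; intro h; simp at h; exact hw h.2.1
        have hpre0 : pvDep pre = 0 := pvDep_brfree pre (fun c hc' =>
          hcur c (by rw [heq]; exact List.mem_append_left _ (List.mem_append_left _ hc')))
        refine ⟨(d0, cur0), Or.inr (by rw [if_pos hc]; simp), ?_, ⟨pre, suf, heq.symm⟩⟩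
        rwa [hpre0, add_zero] at hP
  | cons ch t ih =>
    intro segs0 d0 cur0 hcur
    rw [List.foldl_cons]
    by_cases hbr : pvIsBracket ch
    · rw [show pvStepSplit (segs0, d0, cur0) ch =
          ((if cur0 ≠ [] then segs0 ++ [(d0, cur0)] else segs0),
           d0 + (if ch = '[' then 1 else -1), []) from by simp [pvStepSplit, hbr]]
      rw [ih _ _ [] (by simp)]
      rw [pvOcc_mid w hw hwb P d0 ch hbr cur0 t hcur]
      simp only [List.nil_append]
      by_cases hc : cur0 ≠ []
      · rw [if_pos hc]
        constructor
        · rintro (⟨ds, hds, hP, hinf⟩ | ⟨pre, suf, heq, hP⟩)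
          · rcases List.mem_append.mp hds with h | h
            · exact Or.inl ⟨ds, h, hP, hinf⟩
            · simp only [List.mem_singleton] at h
              subst h
              exact Or.inr (Or.inl ⟨hinf, hP⟩)
          · exact Or.inr (Or.inr ⟨pre, suf, heq, hP⟩)
        · rintro (⟨ds, hds, hP, hinf⟩ | ⟨hinf, hP⟩ | ⟨pre, suf, heq, hP⟩)
          · exact Or.inl ⟨ds, List.mem_append_left _ hds, hP, hinf⟩
          · exact Or.inl ⟨(d0, cur0), List.mem_append_right _ (by simp), hP, hinf⟩
          · exact Or.inr ⟨pre, suf, heq, hP⟩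
      · rw [if_neg hc]
        push_neg at hc
        subst hc
        constructor
        · rintro (⟨ds, hds, hP, hinf⟩ | ⟨pre, suf, heq, hP⟩)
          · exact Or.inl ⟨ds, hds, hP, hinf⟩
          · exact Or.inr (Or.inr ⟨pre, suf, heq, hP⟩)
        · rintro (⟨ds, hds, hP, hinf⟩ | ⟨hinf, hP⟩ | ⟨pre, suf, heq, hP⟩)
          · exact Or.inl ⟨ds, hds, hP, hinf⟩
          · exact absurd (List.eq_nil_of_infix_nil hinf) hw
          · exact Or.inr ⟨pre, suf, heq, hP⟩
    · rw [show pvStepSplit (segs0, d0, cur0) ch = (segs0, d0, cur0 ++ [ch]) from by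
        simp [pvStepSplit, hbr]]
      rw [ih _ _ (cur0 ++ [ch]) (fun c hc => by
        rcases List.mem_append.mp hc with h | h
        · exact hcur c h
        · simp only [List.mem_singleton] at h; subst h; exact Bool.not_eq_true _ ▸ (by simpa using hbr))]
      rw [List.append_assoc]
      simp

lemma pvSegs_brfree (l : List Char) :
    ∀ (segs0 : List (Int × List Char)) (d0 : Int) (cur0 : List Char),
      (∀ ds ∈ segs0, ∀ ch ∈ ds.2, pvIsBracket ch = false) →
      (∀ ch ∈ cur0, pvIsBracket ch = false) →
      ∀ ds ∈ pvFlush (l.foldl pvStepSplit (segs0, d0, cur0)), ∀ ch ∈ ds.2,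
        pvIsBracket ch = false := by
  induction l with
  | nil =>
    intro segs0 d0 cur0 hs hcur ds hds
    simp only [List.foldl_nil, pvFlush, List.mem_append] at hds
    rcases hds with h | h
    · exact hs ds h
    · split at h
      · simp only [List.mem_singleton] at h; subst h; exact hcur
      · simp at h
  | cons ch t ih =>
    intro segs0 d0 cur0 hs hcur
    rw [List.foldl_cons]
    by_cases hbr : pvIsBracket ch
    · rw [show pvStepSplit (segs0, d0, cur0) ch =
          ((if cur0 ≠ [] then segs0 ++ [(d0, cur0)] else segs0),
           d0 + (if ch = '[' then 1 else -1), []) from by simp [pvStepSplit, hbr]]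
      refine ih _ _ [] ?_ (by simp)
      split
      · intro ds hds
        rcases List.mem_append.mp hds with h | h
        · exact hs ds h
        · simp only [List.mem_singleton] at h; subst h; exact hcur
      · exact hs
    · rw [show pvStepSplit (segs0, d0, cur0) ch = (segs0, d0, cur0 ++ [ch]) from by
        simp [pvStepSplit, hbr]]
      refine ih _ _ _ hs ?_
      intro c hc
      rcases List.mem_append.mp hc with h | h
      · exact hcur c h
      · simp only [List.mem_singleton] at h; subst h; simpa using hbr

lemma pvCollect_mem (segs : List (Int × List Char)) :
    ∀ (acc : PySem.Set (Char × Char) × PySem.Set (Char × Char)) (p : Char × Char),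
      (p ∈ (segs.foldl pvStepCollect acc).1 ↔
        p ∈ acc.1 ∨ ∃ ds ∈ segs, ds.1 = 0 ∧ p ∈ pvPairs ds.2) ∧
      (p ∈ (segs.foldl pvStepCollect acc).2 ↔
        p ∈ acc.2 ∨ ∃ ds ∈ segs, ds.1 ≠ 0 ∧ (p.2, p.1) ∈ pvPairs ds.2) := by
  induction segs with
  | nil => intro acc p; simp
  | cons ds0 rest ih =>
    intro acc p
    rw [List.foldl_cons]
    obtain ⟨ih1, ih2⟩ := ih (pvStepCollect acc ds0) p
    by_cases h0 : ds0.1 ≠ 0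
    · rw [show pvStepCollect acc ds0 =
          (acc.1, PySem.Set.union acc.2 ((PySem.Set.ofList (pvPairs ds0.2)).map (fun p => (p.2, p.1))))
          from by simp [pvStepCollect, h0]] at ih1 ih2 ⊢
      constructor
      · rw [ih1]
        constructor
        · rintro (h | ⟨ds, hds, h⟩)
          · exact Or.inl h
          · exact Or.inr ⟨ds, List.mem_cons_of_mem _ hds, h⟩
        · rintro (h | ⟨ds, hds, hd, h⟩)
          · exact Or.inl h
          · rcases List.mem_cons.mp hds with rfl | hds'
            · exact absurd hd h0
            · exact Or.inr ⟨ds, hds', hd, h⟩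
      · rw [ih2, PySem.Set.mem_union]
        constructor
        · rintro ((h | h) | ⟨ds, hds, h⟩)
          · exact Or.inl h
          · right
            refine ⟨ds0, List.mem_cons_self, h0, ?_⟩
            rcases List.mem_map.mp h with ⟨q, hq, hqe⟩
            have : q = (p.2, p.1) := by
              cases q; cases p; simp at hqe; simp [hqe.1.symm, hqe.2.symm]
            rw [← this]; exact (PySem.Set.mem_ofList _ _).mp hq
          · exact Or.inr ⟨ds, List.mem_cons_of_mem _ hds, h⟩
        · rintro (h | ⟨ds, hds, hd, h⟩)
          · exact Or.inl (Or.inl h)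
          · rcases List.mem_cons.mp hds with rfl | hds'
            · exact Or.inl (Or.inr (List.mem_map.mpr
                ⟨(p.2, p.1), (PySem.Set.mem_ofList _ _).mpr h, by simp⟩))
            · exact Or.inr ⟨ds, hds', hd, h⟩
    · push_neg at h0
      rw [show pvStepCollect acc ds0 =
          (PySem.Set.union acc.1 (PySem.Set.ofList (pvPairs ds0.2)), acc.2)
          from by simp [pvStepCollect, h0]] at ih1 ih2 ⊢
      constructor
      · rw [ih1, PySem.Set.mem_union]
        constructor
        · rintro ((h | h) | ⟨ds, hds, h⟩)
          · exact Or.inl h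
          · exact Or.inr ⟨ds0, List.mem_cons_self, h0, (PySem.Set.mem_ofList _ _).mp h⟩
          · exact Or.inr ⟨ds, List.mem_cons_of_mem _ hds, h⟩
        · rintro (h | ⟨ds, hds, hd, h⟩)
          · exact Or.inl (Or.inl h)
          · rcases List.mem_cons.mp hds with rfl | hds'
            · exact Or.inl (Or.inr ((PySem.Set.mem_ofList _ _).mpr h))
            · exact Or.inr ⟨ds, hds', hd, h⟩
      · rw [ih2]
        constructor
        · rintro (h | ⟨ds, hds, h⟩)
          · exact Or.inl h
          · exact Or.inr ⟨ds, List.mem_cons_of_mem _ hds, h⟩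
        · rintro (h | ⟨ds, hds, hd, h⟩)
          · exact Or.inl h
          · rcases List.mem_cons.mp hds with rfl | hds'
            · exact absurd h0 hd
            · exact Or.inr ⟨ds, hds', hd, h⟩

lemma pvB_iff (ip : String) : has_ssl_support_alt ip = true ↔ pvMatch ip.toList := by
  unfold has_ssl_support_alt
  set l := ip.toList with hl
  set segs := pvFlush (l.foldl pvStepSplit ([], 0, [])) with hsegs
  set ab := segs.foldl pvStepCollect (PySem.Set.empty, PySem.Set.empty) with hab
  have hbool : (!(PySem.Set.inter ab.1 ab.2).isEmpty) = true ↔ ∃ p, p ∈ ab.1 ∧ p ∈ ab.2 := by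
    rw [Bool.not_eq_true', List.isEmpty_eq_false_iff_exists_mem]
    constructor
    · rintro ⟨p, hp⟩
      exact ⟨p, (PySem.Set.mem_inter ab.1 ab.2 p).mp hp⟩
    · rintro ⟨p, h1, h2⟩
      exact ⟨p, (PySem.Set.mem_inter ab.1 ab.2 p).mpr ⟨h1, h2⟩⟩
  rw [hbool]
  have hbr : ∀ ds ∈ segs, ∀ ch ∈ ds.2, pvIsBracket ch = false :=
    pvSegs_brfree l [] 0 [] (by simp) (by simp)
  constructor
  · rintro ⟨p, h1, h2⟩
    obtain ⟨c, m⟩ := p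
    rcases ((pvCollect_mem segs _ (c, m)).1).mp h1 with h | ⟨ds, hds, hd0, hp⟩
    · simp [PySem.Set.empty] at h
    rcases ((pvCollect_mem segs _ (c, m)).2).mp h2 with h | ⟨ds', hds', hd0', hp'⟩
    · simp [PySem.Set.empty] at h
    obtain ⟨hinf, hcm⟩ := (pvPairs_mem ds.2 c m).mp hp
    obtain ⟨hinf', -⟩ := (pvPairs_mem ds'.2 m c).mp hp'
    have hc : pvIsBracket c = false := hbr ds hds c (hinf.mem (by simp))
    have hm : pvIsBracket m = false := hbr ds hds m (hinf.mem (by simp))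
    have hwb : ∀ ch ∈ [c, m, c], pvIsBracket ch = false := by
      intro ch hch
      simp only [List.mem_cons, List.not_mem_nil, or_false] at hch
      rcases hch with rfl | rfl | rfl <;> assumption
    have hwb' : ∀ ch ∈ [m, c, m], pvIsBracket ch = false := by
      intro ch hch
      simp only [List.mem_cons, List.not_mem_nil, or_false] at hch
      rcases hch with rfl | rfl | rfl <;> assumption
    refine ⟨c, m, hc, hm, hcm, ?_, ?_⟩
    · have := (pvM [c, m, c] (by simp) hwb (· = 0) l [] 0 [] (by simp)).mp
        ⟨ds, hds, hd0, hinf⟩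
      rcases this with ⟨ds'', h, _⟩ | ⟨pre, suf, heq, hP⟩
      · simp at h
      · exact ⟨pre, suf, by simpa using heq, by omega⟩
    · have := (pvM [m, c, m] (by simp) hwb' (· ≠ 0) l [] 0 [] (by simp)).mp
        ⟨ds', hds', hd0', hinf'⟩
      rcases this with ⟨ds'', h, _⟩ | ⟨pre, suf, heq, hP⟩
      · simp at h
      · exact ⟨pre, suf, by simpa using heq, by omega⟩
  · rintro ⟨c, m, hc, hm, hcm, ⟨pre, suf, heq, hP⟩, ⟨pre', suf', heq', hP'⟩⟩
    have hwb : ∀ ch ∈ [c, m, c], pvIsBracket ch = false := by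
      intro ch hch
      simp only [List.mem_cons, List.not_mem_nil, or_false] at hch
      rcases hch with rfl | rfl | rfl <;> assumption
    have hwb' : ∀ ch ∈ [m, c, m], pvIsBracket ch = false := by
      intro ch hch
      simp only [List.mem_cons, List.not_mem_nil, or_false] at hch
      rcases hch with rfl | rfl | rfl <;> assumption
    obtain ⟨ds, hds, hd0, hinf⟩ :=
      (pvM [c, m, c] (by simp) hwb (· = 0) l [] 0 [] (by simp)).mpr
        (Or.inr ⟨pre, suf, by simpa using heq, by omega⟩)
    obtain ⟨ds', hds', hd0', hinf'⟩ :=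
      (pvM [m, c, m] (by simp) hwb' (· ≠ 0) l [] 0 [] (by simp)).mpr
        (Or.inr ⟨pre', suf', by simpa using heq', by omega⟩)
    refine ⟨(c, m), ?_, ?_⟩
    · exact ((pvCollect_mem segs _ (c, m)).1).mpr
        (Or.inr ⟨ds, hds, hd0, (pvPairs_mem ds.2 c m).mpr ⟨hinf, hcm⟩⟩)
    · exact ((pvCollect_mem segs _ (c, m)).2).mpr
        (Or.inr ⟨ds', hds', hd0', (pvPairs_mem ds'.2 m c).mpr ⟨hinf', fun h => hcm h.symm⟩⟩)

-- ===== VERDICT (by name: the statement is the Claim_ definition above) =====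
theorem has_ssl_support_spec : Claim_equal_has_ssl_support := by
  intro ip _
  unfold Spec_has_ssl_support
  have h := (pvA_iff ip).trans (pvB_iff ip).symm
  cases hA : has_ssl_support ip <;> cases hB : has_ssl_support_alt ip <;> simp_all
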